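-- pv_equiv track=rewrite | github.com/minenam/algorithm-total | 프로그래머스/0/120896. 한 번만 등장한 문자/한 번만 등장한 문자.py | solution
-- ===== SOURCE A (Python) =====
-- def solution(s):
--     answer = ''
--     dic = dict()
--
--     for char in s:
--         if char in dic:
--             dic[char] += 1
--         else:
--             dic[char] = 1
--
--     for key, value in dic.items():
--         if value == 1:
--             answer += key
--
--     return ''.join(sorted(answer))
-- ===== SOURCE B (Python) =====
-- def solution(s):
--     cs = sorted(s)
--     out = []
--     i = 0
--     n = len(cs)
--     while i < n:
--         j = i + 1
--         while j < n and cs[j] == cs[i]: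
--             j += 1
--         if j == i + 1:
--             out.append(cs[i])
--         i = j
--     return ''.join(out)
-- ===== Notes on version B (the rewrite author's own statement) =====
-- stated objective: alternative
-- what changed: Replaces the count-in-a-dict, filter, then sort strategy by sorting the string once and scanning the sorted characters as runs, keeping exactly the length-1 runs (output is already in order).
import Mathlib
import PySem

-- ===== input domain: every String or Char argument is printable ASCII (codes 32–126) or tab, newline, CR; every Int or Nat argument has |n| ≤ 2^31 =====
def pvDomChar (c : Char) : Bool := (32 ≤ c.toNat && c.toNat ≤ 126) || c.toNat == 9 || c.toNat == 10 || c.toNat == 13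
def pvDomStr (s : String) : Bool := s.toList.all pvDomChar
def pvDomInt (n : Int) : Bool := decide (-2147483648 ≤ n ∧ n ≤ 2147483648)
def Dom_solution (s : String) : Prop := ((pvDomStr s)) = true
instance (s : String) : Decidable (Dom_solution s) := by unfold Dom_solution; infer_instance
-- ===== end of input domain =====

-- B sorts the string once and keeps the length-1 runs of the sorted scan, instead of A's
-- count-in-a-dict / filter / sort; an alternative strategy of similar cost, same output.

-- ===== PORT A =====
def solution (s : String) : String :=
  let dic := s.toList.foldl (fun d c =>
      if d.contains c then
        -- dic[char] += 1 : read-then-store; the read is guarded by 'char in dic', so getD is exact here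
        d.insert c (d.getD c 0 + 1)
      else
        d.insert c (1 : Int)) PySem.Dict.empty
  let answer := dic.items.foldl
      (fun a p => if p.2 == (1 : Int) then a ++ [p.1] else a) ([] : List Char)
  String.ofList (PySem.List.sorted answer (fun c => c) false)

-- ===== PORT B =====
-- run scan over the sorted characters: keep a character iff its run has length 1
def scanRuns : List Char → List Char
  | [] => []
  | c :: rest =>
      if (rest.takeWhile (fun x => x == c)).isEmpty then
        c :: scanRuns (rest.dropWhile (fun x => x == c))
      else
        scanRuns (rest.dropWhile (fun x => x == c))
  termination_by xs => xs.length
  decreasing_by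
    all_goals simp only [List.length_cons]
    all_goals exact Nat.lt_succ_of_le (List.length_dropWhile_le _ _)

def solution_alt (s : String) : String :=
  String.ofList (scanRuns (PySem.List.sorted s.toList (fun c => c) false))

-- ===== PRECONDITION & SPEC =====
def Spec_solution (s : String) (out : String) : Prop := out = solution_alt s
instance (s : String) (out : String) : Decidable (Spec_solution s out) := by unfold Spec_solution; infer_instance

-- ===== CLAIM (what is proved, stated in full; the proofs are below) =====
def Claim_equal_solution : Prop := ∀ (s : String), Dom_solution s → Spec_solution s (solution s)

-- ===== LEMMAS AND PROOFS =====

-- A's answer string (before its final sort) is the distinct characters of s whose count is 1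
lemma answer_eq (l : List Char) :
    ((l.foldl (fun d c =>
        if d.contains c then d.insert c (d.getD c 0 + 1)
        else d.insert c (1 : Int)) PySem.Dict.empty).items.foldl
      (fun a p => if p.2 == (1 : Int) then a ++ [p.1] else a) ([] : List Char))
    = (PySem.Set.ofList l).filter (fun c => l.count c == 1) := by
  have h1 : (l.foldl (fun d c =>
        if d.contains c then d.insert c (d.getD c 0 + 1)
        else d.insert c (1 : Int)) PySem.Dict.empty)
      = PySem.Dict.counter l := by
    rw [← PySem.Dict.foldl_insert_getD_add_one_eq_counter]
    apply PySem.List.foldl_congr_mem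
    intro d c _
    by_cases h : d.contains c
    · simp [h]
    · have h0 := PySem.Dict.getD_of_not_contains (d := d) (k := c) (d0 := (0 : Int))
        (by simpa using h)
      simp [h, h0]
  rw [h1, PySem.Dict.items_counter, PySem.List.foldl_append_if]
  simp only [List.nil_append, List.filter_map, List.map_map, Function.comp_def]
  rw [List.map_id']
  apply List.filter_congr
  intro c _
  simp [Nat.cast_eq_one]

-- in a ≤-sorted list, everything after the run of the head differs from the head
lemma tail_ne (c : Char) (rest : List Char) (h : (c :: rest).Pairwise (· ≤ ·)) :
    ∀ x ∈ rest.dropWhile (fun x => x == c), x ≠ c := by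
  rcases List.pairwise_cons.mp h with ⟨hc, hp⟩
  cases ht : rest.dropWhile (fun x => x == c) with
  | nil => simp
  | cons h0 t' =>
    have hh0 : ¬ h0 = c := by
      have hl : 0 < (rest.dropWhile (fun x => x == c)).length := by rw [ht]; simp
      have := List.dropWhile_get_zero_not (p := fun x => x == c) rest hl
      simp only [List.get_eq_getElem, ht, List.getElem_cons_zero] at this
      simpa using this
    have hch0 : c < h0 := by
      have hmem : h0 ∈ rest := (List.dropWhile_sublist _).mem (by rw [ht]; simp)
      rcases lt_or_eq_of_le (hc h0 hmem) with h' | h'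
      · exact h'
      · exact absurd h'.symm hh0
    have htp : (h0 :: t').Pairwise (· ≤ ·) := by
      rw [← ht]; exact hp.sublist (List.dropWhile_sublist _)
    intro x hx
    rcases List.mem_cons.mp hx with rfl | hx'
    · exact hh0
    · have h1 : h0 ≤ x := (List.pairwise_cons.mp htp).1 x hx'
      exact fun hxc => absurd (hxc ▸ h1) (not_le.mpr hch0)

-- the run scan of a ≤-sorted list keeps exactly the characters occurring once in it
lemma scanRuns_eq_filter (xs : List Char) (h : xs.Pairwise (· ≤ ·)) :
    scanRuns xs = xs.filter (fun c => xs.count c == 1) := by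
  induction xs using scanRuns.induct with
  | case1 => simp [scanRuns]
  | case2 c rest he ih =>
    rcases List.pairwise_cons.mp h with ⟨hc, hp⟩
    have hrun0 : rest.takeWhile (fun x => x == c) = [] := List.isEmpty_iff.mp he
    have hteq : rest.dropWhile (fun x => x == c) = rest := by
      have h2 := List.takeWhile_append_dropWhile (p := fun x => x == c) (l := rest)
      rw [hrun0] at h2; simpa using h2
    have hne : ∀ x ∈ rest, x ≠ c := by
      have h3 := tail_ne c rest h; rwa [hteq] at h3
    have hc0 : rest.count c = 0 := List.count_eq_zero.mpr (fun hm => (hne c hm) rfl)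
    have hcnt : (((c :: rest).count c) == 1) = true := by
      simp [List.count_cons_self, hc0]
    rw [scanRuns, if_pos he, ih (by rwa [hteq]), hteq, List.filter_cons, hcnt]
    simp only [if_true]
    congr 1
    apply List.filter_congr
    intro x hx
    have hcx : ¬ c = x := fun e => (hne x hx) e.symm
    simp [hcx]
  | case3 c rest he ih =>
    rcases List.pairwise_cons.mp h with ⟨hc, hp⟩
    have hsplit : rest.takeWhile (fun x => x == c) ++ rest.dropWhile (fun x => x == c) = rest :=
      List.takeWhile_append_dropWhile
    have hrun : ∀ x ∈ rest.takeWhile (fun x => x == c), x = c :=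
      fun x hx => by simpa using List.mem_takeWhile_imp hx
    have htne : ∀ x ∈ rest.dropWhile (fun x => x == c), x ≠ c := tail_ne c rest h
    have htp : (rest.dropWhile (fun x => x == c)).Pairwise (· ≤ ·) :=
      hp.sublist (List.dropWhile_sublist _)
    have hct : (rest.dropWhile (fun x => x == c)).count c = 0 :=
      List.count_eq_zero.mpr (fun hm => (htne c hm) rfl)
    have hcr : (rest.takeWhile (fun x => x == c)).count c
        = (rest.takeWhile (fun x => x == c)).length :=
      List.count_eq_length.mpr (fun b hb => (hrun b hb).symm)
    have hlen : 0 < (rest.takeWhile (fun x => x == c)).length := by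
      cases hq : rest.takeWhile (fun x => x == c) with
      | nil => exact absurd (by rw [hq]; rfl) he
      | cons _ _ => exact Nat.succ_pos _
    have hcrest : rest.count c = (rest.takeWhile (fun x => x == c)).length := by
      conv_lhs => rw [← hsplit]
      rw [List.count_append, hcr, hct, Nat.add_zero]
    have hcc : (c :: rest).count c = (rest.takeWhile (fun x => x == c)).length + 1 := by
      rw [List.count_cons_self, hcrest]
    have hpc : (((c :: rest).count c) == 1) = false := by
      rw [hcc]; simp only [beq_eq_false_iff_ne, ne_eq]; omega
    have hfr : (rest.takeWhile (fun x => x == c)).filter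
        (fun y => (c :: rest).count y == 1) = [] := by
      rw [List.filter_eq_nil_iff]
      intro y hy
      rw [hrun y hy, hcc]
      simp only [beq_iff_eq]; omega
    rw [scanRuns, if_neg he, ih htp, List.filter_cons, hpc]
    simp only [Bool.false_eq_true, if_false]
    have hsp2 : rest.filter (fun y => (c :: rest).count y == 1)
        = (rest.takeWhile (fun x => x == c)).filter (fun y => (c :: rest).count y == 1)
          ++ (rest.dropWhile (fun x => x == c)).filter (fun y => (c :: rest).count y == 1) := by
      rw [← List.filter_append, hsplit]
    rw [hsp2, hfr, List.nil_append]
    apply List.filter_congr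
    intro x hx
    have hxc : (x == c) = false := by simpa using htne x hx
    have hxr : (rest.takeWhile (fun x => x == c)).count x = 0 :=
      List.count_eq_zero.mpr (fun hm => (by simp [hrun x hm] at hxc))
    have h5 : rest.count x = (rest.dropWhile (fun x => x == c)).count x := by
      conv_lhs => rw [← hsplit]
      rw [List.count_append, hxr, Nat.zero_add]
    have hcx' : ¬ c = x := fun e => (htne x hx) e.symm
    have hxcnt : (c :: rest).count x = (rest.dropWhile (fun x => x == c)).count x := by
      simp [hcx', h5]
    rw [hxcnt]

-- sorting A's filtered distinct characters gives exactly B's run scan of the sorted string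
lemma sorted_filter_eq_scanRuns (l : List Char) :
    PySem.List.sorted ((PySem.Set.ofList l).filter (fun c => l.count c == 1)) (fun c => c) false
    = scanRuns (PySem.List.sorted l (fun c => c) false) := by
  have hperm : (PySem.List.sorted l (fun c => c) false).Perm l := PySem.List.sorted_perm ..
  have hpair : (PySem.List.sorted l (fun c => c) false).Pairwise (· ≤ ·) :=
    PySem.List.sorted_pairwise ..
  have hcnt : ∀ a : Char, (PySem.List.sorted l (fun c => c) false).count a = l.count a :=
    fun a => hperm.count a
  rw [scanRuns_eq_filter _ hpair]
  have hfe : (PySem.List.sorted l (fun c => c) false).filter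
        (fun c => (PySem.List.sorted l (fun c => c) false).count c == 1)
      = (PySem.List.sorted l (fun c => c) false).filter (fun c => l.count c == 1) :=
    List.filter_congr (fun x _ => by rw [hcnt])
  rw [hfe]
  have hynd : ((PySem.List.sorted l (fun c => c) false).filter
      (fun c => l.count c == 1)).Nodup := by
    rw [List.nodup_iff_count_le_one]
    intro a
    by_cases hm : a ∈ (PySem.List.sorted l (fun c => c) false).filter (fun c => l.count c == 1)
    · have ha1 : l.count a = 1 := by simpa using (List.mem_filter.mp hm).2
      calc ((PySem.List.sorted l (fun c => c) false).filter
              (fun c => l.count c == 1)).count a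
          ≤ (PySem.List.sorted l (fun c => c) false).count a :=
            List.Sublist.count_le a List.filter_sublist
        _ = 1 := by rw [hcnt a, ha1]
    · rw [List.count_eq_zero.mpr hm]; omega
  apply PySem.List.sorted_eq_of_perm_of_pairwise_lt
  · apply (List.perm_ext_iff_of_nodup hynd ((PySem.Set.nodup_ofList l).filter _)).mpr
    intro a
    simp [List.mem_filter, PySem.List.mem_sorted, PySem.Set.mem_ofList]
  · have h1 : ((PySem.List.sorted l (fun c => c) false).filter
        (fun c => l.count c == 1)).Pairwise (· ≤ ·) := hpair.sublist List.filter_sublist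
    exact (h1.and hynd).imp (fun hab => lt_of_le_of_ne hab.1 hab.2)

-- ===== VERDICT (by name: the statement is the Claim_ definition above) =====
theorem solution_spec : Claim_equal_solution := by
  intro s _
  unfold Spec_solution solution solution_alt
  simp only []
  rw [answer_eq s.toList, sorted_filter_eq_scanRuns s.toList]
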